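-- pv_equiv track=rewrite | github.com/zre1ked/bot_tgshechka | botik.py | get_links_info
-- ===== SOURCE A (Python) =====
-- def get_links_info(links):
--     categories = {
--         "EternalRose": "EternalRose",
--         "ScaredCat": "ScaredCat",
--         "SignetRing": "SignetRing",
--         "VintageCigar": "VintageCigar",
--         "GenieLamp": "GenieLamp",
--         "TopHat": "TopHat",
--         "DiamondRing": "DiamondRing",
--         "SwissWatch": "SwissWatch"
--     }
--
--     info = "Количество оставшихся ссылок:\n\n"
--     for category, name in categories.items():
--         count = len(filter_links_by_category(links, category))
--         info += f"{name}: {count}\n"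
--
--     return info
--
-- def filter_links_by_category(links, category):
--     return [link for link in links if category in link]
-- ===== SOURCE B (Python) =====
-- CATEGORY_NAMES = [
--     "EternalRose", "ScaredCat", "SignetRing", "VintageCigar",
--     "GenieLamp", "TopHat", "DiamondRing", "SwissWatch",
-- ]
--
-- def get_links_info(links):
--     counts = {name: 0 for name in CATEGORY_NAMES}
--     for link in links:
--         for name in CATEGORY_NAMES:
--             if name in link:
--                 counts[name] += 1
--     lines = [f"{name}: {counts[name]}" for name in CATEGORY_NAMES]
--     return "Количество оставшихся ссылок:\n\n" + "\n".join(lines) + "\n"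
-- ===== Notes on version B (the rewrite author's own statement) =====
-- stated objective: alternative
-- what changed: Instead of eight separate passes that each build a filtered list per category and measure its length, B pre-initialises a counter dict over the fixed category names and tallies all categories in a single pass over the links, then assembles the report with a join.
import Mathlib
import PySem

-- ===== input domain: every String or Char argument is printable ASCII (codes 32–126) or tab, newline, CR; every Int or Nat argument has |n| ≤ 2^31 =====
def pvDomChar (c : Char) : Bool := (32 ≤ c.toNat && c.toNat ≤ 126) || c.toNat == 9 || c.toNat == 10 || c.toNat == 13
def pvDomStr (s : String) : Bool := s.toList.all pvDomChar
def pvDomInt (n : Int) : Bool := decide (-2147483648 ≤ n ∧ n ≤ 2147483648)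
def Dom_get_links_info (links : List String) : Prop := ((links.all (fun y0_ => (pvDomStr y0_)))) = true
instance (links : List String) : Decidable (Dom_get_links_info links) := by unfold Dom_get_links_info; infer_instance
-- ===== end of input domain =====

-- B replaces eight full scans of the link list (one list built and measured per category)
-- by a single counting pass over the links with a pre-initialised counter dict (objective: alternative decomposition).

-- ===== PORT A =====
def filter_links_by_category (links : List String) (category : String) : List String :=
  links.filter (fun link => PySem.Str.isIn category link)

def pvCategories : PySem.Dict String String := PySem.Dict.ofList
  [("EternalRose","EternalRose"), ("ScaredCat","ScaredCat"), ("SignetRing","SignetRing"),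
   ("VintageCigar","VintageCigar"), ("GenieLamp","GenieLamp"), ("TopHat","TopHat"),
   ("DiamondRing","DiamondRing"), ("SwissWatch","SwissWatch")]

def get_links_info (links : List String) : String :=
  (PySem.Dict.items pvCategories).foldl
    (fun info p =>
      info ++ (p.2 ++ ": " ++ PySem.Int.toStr ((filter_links_by_category links p.1).length : Int) ++ "\n"))
    "Количество оставшихся ссылок:\n\n"

-- ===== PORT B =====
def pvCategoryNames : List String :=
  ["EternalRose", "ScaredCat", "SignetRing", "VintageCigar",
   "GenieLamp", "TopHat", "DiamondRing", "SwissWatch"]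

def pvCounts (links : List String) : PySem.Dict String Int :=
  links.foldl
    (fun d link =>
      pvCategoryNames.foldl
        (fun d name => if PySem.Str.isIn name link then d.modify name 0 (· + 1) else d) d)
    (pvCategoryNames.foldl (fun d name => d.insert name 0) PySem.Dict.empty)

def get_links_info_alt (links : List String) : String :=
  "Количество оставшихся ссылок:\n\n"
    ++ PySem.Str.join "\n"
        (pvCategoryNames.map (fun name => name ++ ": " ++ PySem.Int.toStr ((pvCounts links).getD name 0)))
    ++ "\n"

-- ===== PRECONDITION & SPEC =====
def Spec_get_links_info (links : List String) (out : String) : Prop := out = get_links_info_alt links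
instance (links : List String) (out : String) : Decidable (Spec_get_links_info links out) := by unfold Spec_get_links_info; infer_instance

-- ===== CLAIM (what is proved, stated in full; the proofs are below) =====
def Claim_equal_get_links_info : Prop := ∀ (links : List String), Dom_get_links_info links → Spec_get_links_info links (get_links_info links)

-- ===== LEMMAS AND PROOFS =====

-- effect of B's inner loop (over the category names) on one counter cell
lemma pv_inner_getD (link : String) (names : List String) (d : PySem.Dict String Int) (name : String) :
    (names.foldl (fun d n => if PySem.Str.isIn n link then d.modify n 0 (· + 1) else d) d).getD name 0
      = d.getD name 0 + (if PySem.Str.isIn name link then (names.count name : Int) else 0) := by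
  induction names generalizing d with
  | nil => simp
  | cons n ns ih =>
    rw [List.foldl_cons, ih, List.count_cons]
    by_cases hin : PySem.Str.isIn n link = true
    · rw [if_pos hin, PySem.Dict.getD_modify]
      by_cases hn : name = n
      · subst hn
        simp only [if_pos hin, beq_self_eq_true, if_true]
        push_cast; ring
      · rw [if_neg hn]
        simp only [beq_iff_eq, if_neg (fun h => hn (Eq.symm h)), Nat.add_zero]
    · rw [if_neg hin]
      by_cases hn : name = n
      · subst hn
        simp only [if_neg hin, beq_self_eq_true, if_true]
      · simp only [beq_iff_eq, if_neg (fun h => hn (Eq.symm h)), Nat.add_zero]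

-- effect of B's outer loop (over the links) on one counter cell
lemma pv_outer_getD (links : List String) (d : PySem.Dict String Int) (name : String) :
    (links.foldl
        (fun d link =>
          pvCategoryNames.foldl
            (fun d n => if PySem.Str.isIn n link then d.modify n 0 (· + 1) else d) d) d).getD name 0
      = d.getD name 0
        + (pvCategoryNames.count name : Int) * (links.countP (fun l => PySem.Str.isIn name l)) := by
  induction links generalizing d with
  | nil => simp
  | cons l ls ih =>
    rw [List.foldl_cons, ih, pv_inner_getD, List.countP_cons]
    by_cases hin : PySem.Str.isIn name l = true
    · simp only [hin, if_true]
      push_cast; ring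
    · rw [if_neg hin, if_neg hin]
      push_cast; ring

lemma pv_init_zero (names : List String) (d : PySem.Dict String Int)
    (h : ∀ k, d.getD k 0 = 0) (k : String) :
    (names.foldl (fun d n => d.insert n 0) d).getD k 0 = 0 := by
  induction names generalizing d with
  | nil => exact h k
  | cons n ns ih =>
    refine ih _ (fun k' => ?_)
    by_cases hk : k' = n
    · subst hk; simp [PySem.Dict.getD_insert_self]
    · rw [PySem.Dict.getD_insert_of_ne _ _ _ hk]; exact h k'

-- B's final counter cell for a category present exactly once in the list
lemma pv_counts_eq (links : List String) (name : String)
    (h1 : pvCategoryNames.count name = 1) :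
    (pvCounts links).getD name 0
      = ((links.filter (fun l => PySem.Str.isIn name l)).length : Int) := by
  unfold pvCounts
  rw [pv_outer_getD, pv_init_zero _ _ (by intro k; simp [PySem.Dict.getD, PySem.Dict.get?, PySem.Dict.empty]), h1]
  simp [List.countP_eq_length_filter]

lemma pv_join8 (a b c d e f g h : String) :
    PySem.Str.join "\n" [a, b, c, d, e, f, g, h]
      = a ++ "\n" ++ b ++ "\n" ++ c ++ "\n" ++ d ++ "\n" ++ e ++ "\n" ++ f ++ "\n" ++ g ++ "\n" ++ h := by
  apply String.ext
  simp [PySem.Str.toList_join, PySem.Chars.join, List.intercalate, List.append_assoc]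

-- ===== VERDICT (by name: the statement is the Claim_ definition above) =====
theorem get_links_info_spec : Claim_equal_get_links_info := by
  intro links _
  unfold Spec_get_links_info get_links_info get_links_info_alt filter_links_by_category
  have hitems : PySem.Dict.items pvCategories =
      [("EternalRose","EternalRose"), ("ScaredCat","ScaredCat"), ("SignetRing","SignetRing"),
       ("VintageCigar","VintageCigar"), ("GenieLamp","GenieLamp"), ("TopHat","TopHat"),
       ("DiamondRing","DiamondRing"), ("SwissWatch","SwissWatch")] := by decide
  rw [hitems]
  simp only [pvCategoryNames, List.foldl_cons, List.foldl_nil, List.map_cons, List.map_nil]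
  rw [pv_counts_eq links "EternalRose" (by decide), pv_counts_eq links "ScaredCat" (by decide),
    pv_counts_eq links "SignetRing" (by decide), pv_counts_eq links "VintageCigar" (by decide),
    pv_counts_eq links "GenieLamp" (by decide), pv_counts_eq links "TopHat" (by decide),
    pv_counts_eq links "DiamondRing" (by decide), pv_counts_eq links "SwissWatch" (by decide),
    pv_join8]
  simp only [String.append_assoc]
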